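-- pv_equiv track=rewrite | github.com/NCAR/rda-python-common | src/rda_python_common/pg_log.py | base2int
-- ===== SOURCE A (Python) =====
-- def base2int(x, base):
--    """Convert a decimal-encoded *base*-number string back to a plain integer.
--
--    The input *x* is a decimal integer whose digits represent a number
--    written in *base* (e.g. ``x=1010, base=2`` → ``10``).
--
--    Args:
--        x:    Integer or string whose digits represent a base-*base* number.
--        base: Source numeric base.
--
--    Returns:
--        Decoded integer value.
--    """
--    if not isinstance(x, int): x = int(x)
--    if x == 0: return 0
--    negative = 0
--    if x < 0:
--       negative = 1
--       x = -x
--    num = 0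
--    fact = 1
--    while x:
--       num += (x % 10) * fact
--       fact *= base
--       x //= 10
--    if negative: num = -num
--    return num
-- ===== SOURCE B (Python) =====
-- def base2int(x, base):
--     """Decode a decimal-encoded base-*base* number via Horner's method
--     over the digit string (MSB-first), instead of extracting digits
--     LSB-first with a running power of base."""
--     if not isinstance(x, int): x = int(x)
--     if x == 0: return 0
--     sign = -1 if x < 0 else 1
--     num = 0
--     for c in str(abs(x)):
--         num = num * base + int(c)
--     return sign * num
-- ===== Notes on version B (the rewrite author's own statement) =====
-- stated objective: idiomatic
-- what changed: Replaces the while x / %10 / running power-of-base loop (LSB-first) with Horner's method over str(abs(x)) walking the digits MSB-first, maintaining only the accumulator and applying the sign by multiplication.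
import Mathlib
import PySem

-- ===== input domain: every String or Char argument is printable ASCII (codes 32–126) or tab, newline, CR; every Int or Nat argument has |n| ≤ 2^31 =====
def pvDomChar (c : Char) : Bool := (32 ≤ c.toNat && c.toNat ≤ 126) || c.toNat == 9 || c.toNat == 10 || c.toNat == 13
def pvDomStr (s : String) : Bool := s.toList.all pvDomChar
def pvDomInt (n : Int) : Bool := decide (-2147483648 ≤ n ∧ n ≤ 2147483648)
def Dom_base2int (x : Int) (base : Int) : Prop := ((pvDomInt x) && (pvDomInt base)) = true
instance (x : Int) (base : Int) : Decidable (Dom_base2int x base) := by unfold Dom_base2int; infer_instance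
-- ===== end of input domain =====

-- B replaces A's LSB-first %10/power-of-base loop by Horner's method over the digit string (idiomatic).

-- ===== PORT A =====
-- 'while x: num += (x%10)*fact; fact *= base; x //= 10' — x is a nonnegative int here, so Nat recursion on x is exact
def base2intLoopA (base : Int) (x : Nat) (num fact : Int) : Int :=
  if x = 0 then num
  else base2intLoopA base (x / 10) (num + (x % 10 : Nat) * fact) (fact * base)
decreasing_by exact Nat.div_lt_self (Nat.pos_of_ne_zero (by assumption)) (by norm_num)

def base2int (x : Int) (base : Int) : Int :=
  if x = 0 then 0
  else
    let negative := x < 0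
    let x' := x.natAbs            -- 'if x < 0: x = -x'
    let num := base2intLoopA base x' 0 1
    if negative then -num else num

-- ===== PORT B =====
-- 'for c in str(abs(x)): num = num*base + int(c)' — str(abs(x)) yields only digit chars,
-- so int(c) = c.toNat - 48 is exact there
def base2int_alt (x : Int) (base : Int) : Int :=
  if x = 0 then 0
  else
    let sign : Int := if x < 0 then -1 else 1
    let num := (PySem.Int.toStr (x.natAbs : Int)).toList.foldl
      (fun num c => num * base + ((c.toNat : Int) - 48)) 0
    sign * num

-- ===== PRECONDITION & SPEC =====
def Spec_base2int (x : Int) (base : Int) (out : Int) : Prop := out = base2int_alt x base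
instance (x : Int) (base : Int) (out : Int) : Decidable (Spec_base2int x base out) := by unfold Spec_base2int; infer_instance

-- ===== CLAIM (what is proved, stated in full; the proofs are below) =====
def Claim_equal_base2int : Prop := ∀ (x : Int) (base : Int), Dom_base2int x base → Spec_base2int x base (base2int x base)

-- ===== LEMMAS AND PROOFS =====

-- mathematical value of the digit decoding: decode b n = Σ dᵢ·bⁱ over the decimal digits of n
def pvDecode (b : Int) (n : Nat) : Int :=
  if n = 0 then 0
  else b * pvDecode b (n / 10) + (n % 10 : Nat)
decreasing_by exact Nat.div_lt_self (Nat.pos_of_ne_zero (by assumption)) (by norm_num)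

def pvNumDigits (n : Nat) : Nat :=
  if n < 10 then 1 else pvNumDigits (n / 10) + 1
decreasing_by exact Nat.div_lt_self (by omega) (by norm_num)

theorem loopA_eq_decode (b : Int) (x : Nat) (num fact : Int) :
    base2intLoopA b x num fact = num + fact * pvDecode b x := by
  induction x using Nat.strong_induction_on generalizing num fact with
  | _ x ih =>
    rw [base2intLoopA, pvDecode]
    by_cases h : x = 0
    · simp [h]
    · simp only [h, if_false]
      rw [ih (x / 10) (Nat.div_lt_self (Nat.pos_of_ne_zero h) (by norm_num))]
      ring

theorem toDigitsCore_append (b : Nat) (f : Nat) :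
    ∀ (n : Nat) (ds : List Char),
      Nat.toDigitsCore b f n ds = Nat.toDigitsCore b f n [] ++ ds := by
  induction f with
  | zero => intro n ds; simp [Nat.toDigitsCore]
  | succ f ih =>
    intro n ds
    simp only [Nat.toDigitsCore]
    by_cases h : n / b = 0
    · simp [h]
    · simp only [h, if_false]
      rw [ih (n / b) ((n % b).digitChar :: ds), ih (n / b) [(n % b).digitChar]]
      simp

theorem digitChar_val (k : Nat) (hk : k < 10) :
    ((Nat.digitChar k).toNat : Int) - 48 = (k : Int) := by
  interval_cases k <;> decide

theorem foldl_toDigitsCore (b : Int) (x : Nat) :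
    ∀ (f : Nat), x < f → ∀ (a : Int),
      (Nat.toDigitsCore 10 f x []).foldl
        (fun num c => num * b + ((c.toNat : Int) - 48)) a
      = a * b ^ pvNumDigits x + pvDecode b x := by
  induction x using Nat.strong_induction_on with
  | _ x ih =>
    intro f hf a
    match f with
    | 0 => omega
    | f + 1 =>
      rw [pvNumDigits]
      by_cases h : x < 10
      · have hx : x / 10 = 0 := Nat.div_eq_of_lt h
        have hm : x % 10 = x := Nat.mod_eq_of_lt h
        simp only [Nat.toDigitsCore, hx, if_true, hm, List.foldl]
        rw [digitChar_val x h, pvDecode]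
        have hz : pvDecode b 0 = 0 := by rw [pvDecode]; simp
        by_cases h0 : x = 0
        · simp [h0]
        · simp only [h0, if_false, hx, hz, hm, h, if_true]
          ring
      · have hx : x / 10 ≠ 0 := by
          intro h0; exact h (by omega)
        rw [show Nat.toDigitsCore 10 (f + 1) x [] =
              Nat.toDigitsCore 10 f (x / 10) [(x % 10).digitChar] by
            conv_lhs => rw [Nat.toDigitsCore]
            simp [hx]]
        rw [toDigitsCore_append]
        rw [List.foldl_append]
        have hlt : x / 10 < x := Nat.div_lt_self (by omega) (by norm_num)
        rw [ih (x / 10) hlt f (by omega) a]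
        simp only [List.foldl]
        rw [digitChar_val (x % 10) (Nat.mod_lt _ (by norm_num))]
        conv_rhs => rw [pvDecode]
        have hx0 : x ≠ 0 := by omega
        simp only [hx0, if_false, h]
        rw [pow_succ]
        ring

theorem horner_eq_decode (b : Int) (n : Nat) :
    (PySem.Int.toStr (n : Int)).toList.foldl
        (fun num c => num * b + ((c.toNat : Int) - 48)) 0
      = pvDecode b n := by
  rw [PySem.Int.toList_toStr]
  unfold PySem.Int.toChars
  have h1 : ¬ ((n : Int) < 0) := Int.not_lt.mpr (Int.natCast_nonneg n)
  simp only [h1, if_false, Int.toNat_natCast]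
  unfold Nat.toDigits
  rw [foldl_toDigitsCore b n (n + 1) (by omega) 0]
  simp

-- ===== VERDICT (by name: the statement is the Claim_ definition above) =====
theorem base2int_spec : Claim_equal_base2int := by
  intro x base _
  unfold Spec_base2int base2int base2int_alt
  by_cases h0 : x = 0
  · simp [h0]
  · simp only [h0, if_false]
    rw [loopA_eq_decode, horner_eq_decode]
    by_cases hneg : x < 0
    · simp [hneg]
    · simp [hneg]
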